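-- pv_equiv track=rewrite | github.com/kimminki10/algorithms2 | z.uncategorized/softeer804.py | split_two_words
-- ===== SOURCE A (Python) =====
-- def split_two_words(message):
--     result = ""
--     idx = 0
--     while idx < len(message)-1:
--         f, s = message[idx], message[idx+1]
--         if f == s:
--             result += f
--             if f == 'X':
--                 result += 'Q'
--             else:
--                 result += 'X'
--             idx += 1
--         else:
--             result += f + s
--             idx += 2
--
--     while idx < len(message):
--         result += message[idx]
--         idx += 1
--     if len(result) % 2 == 1:
--         result += 'X'
--
--     return result
-- ===== SOURCE B (Python) =====
-- def split_two_words(message):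
--     # Stage 1: run-length encode the string (built scanning from the end,
--     # so the run of the suffix is always at the front of the list).
--     rruns = []  # runs of reversed(message), most recent (i.e. leftmost) last
--     for c in reversed(message):
--         if rruns and rruns[-1][0] == c:
--             rruns[-1] = (c, rruns[-1][1] + 1)
--         else:
--             rruns.append((c, 1))
--     runs = rruns[::-1]
--     # Stage 2: emit per run with a closed form; `carry` means this run's first
--     # char was already consumed as the partner of the previous run's last char.
--     parts = []
--     carry = False
--     for i in range(len(runs)):
--         c, k = runs[i]
--         m = k - 1 if carry else k
--         carry = False
--         if m == 0:
--             continue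
--         filler = 'Q' if c == 'X' else 'X'
--         parts.append((c + filler) * (m - 1))
--         if i + 1 < len(runs):
--             parts.append(c + runs[i + 1][0])
--             carry = True
--         else:
--             parts.append(c)
--     res = ''.join(parts)
--     if len(res) % 2 == 1:
--         res += 'X'
--     return res
-- ===== Notes on version B (the rewrite author's own statement) =====
-- stated objective: faster
-- what changed: Replaces A's pairwise index walk that grows `result` by repeated string concatenation with a two-stage algorithm: run-length encode the string (scanning from the end), then emit each run's output via a closed-form string multiplication (c+filler)*(m-1) plus one boundary pair with a carry into the next run, joining the pieces once.
import Mathlib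
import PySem

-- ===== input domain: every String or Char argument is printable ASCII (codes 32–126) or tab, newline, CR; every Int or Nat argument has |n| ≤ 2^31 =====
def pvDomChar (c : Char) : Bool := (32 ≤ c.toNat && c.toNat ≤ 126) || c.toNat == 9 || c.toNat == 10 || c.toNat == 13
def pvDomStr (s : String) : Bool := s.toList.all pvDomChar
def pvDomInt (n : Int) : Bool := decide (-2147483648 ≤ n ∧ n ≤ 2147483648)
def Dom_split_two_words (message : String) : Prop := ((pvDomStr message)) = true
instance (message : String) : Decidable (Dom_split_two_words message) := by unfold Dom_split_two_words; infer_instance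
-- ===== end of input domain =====

-- B re-implements A via run-length encoding plus a per-run closed form instead of A's pairwise index walk (alternative algorithm, same asymptotic cost); equivalence is proved on all strings.


-- ===== PORT A =====
-- A's while-loop over idx with look-ahead, transcribed as recursion on the remaining
-- suffix, accumulating `result`; the trailing while copies the leftover (≤ 1 char).
def pvALoop : List Char → List Char → List Char
  | f :: s :: rest, result =>
      if f == s then pvALoop (s :: rest) (result ++ [f, if f == 'X' then 'Q' else 'X'])
      else pvALoop rest (result ++ [f, s])
  | rest, result => result ++ rest

def split_two_words (message : String) : String :=
  let r := pvALoop message.toList []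
  String.ofList (if r.length % 2 == 1 then r ++ ['X'] else r)

-- ===== PORT B =====
-- Stage 1 of Source B: run-length encoding built scanning the REVERSED string; the Python
-- loop appends at the back of `rruns` and reverses at the end, so the list it produces
-- is exactly the accumulator read back-to-front: we keep that reversed view directly
-- (Python's rruns[-1] is the accumulator's head) and the final rruns[::-1] is the identity.
def pvRleStep (runs : List (Char × Nat)) (c : Char) : List (Char × Nat) :=
  match runs with
  | (d, k) :: r => if c == d then (c, k + 1) :: r else (c, 1) :: (d, k) :: r
  | [] => [(c, 1)]

def pvRle (l : List Char) : List (Char × Nat) := (l.reverse).foldl pvRleStep []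

-- Stage 2 of Source B: loop over the run list with one-run look-ahead and a carry flag;
-- (c+filler)*(m-1) is the flattened replicate.
def pvEmit : Bool → List (Char × Nat) → List Char
  | _, [] => []
  | carry, (c, k) :: rest =>
      let m := if carry then k - 1 else k
      if m = 0 then pvEmit false rest
      else
        let filler := if c == 'X' then 'Q' else 'X'
        let pairs := (List.replicate (m - 1) [c, filler]).flatten
        match rest with
        | (d, _) :: _ => pairs ++ ([c, d] ++ pvEmit true rest)
        | [] => pairs ++ [c]

def split_two_words_alt (message : String) : String :=
  let r := pvEmit false (pvRle message.toList)
  String.ofList (if r.length % 2 == 1 then r ++ ['X'] else r)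

-- ===== PRECONDITION & SPEC =====
def Spec_split_two_words (message : String) (out : String) : Prop := out = split_two_words_alt message
instance (message : String) (out : String) : Decidable (Spec_split_two_words message out) := by unfold Spec_split_two_words; infer_instance

-- ===== CLAIM (what is proved, stated in full; the proofs are below) =====
def Claim_equal_split_two_words : Prop := ∀ (message : String), Dom_split_two_words message → Spec_split_two_words message (split_two_words message)

-- ===== LEMMAS AND PROOFS =====
-- The run-length encoding as a foldr (fold over the reversed list from the left).
def pvCanon (l : List Char) : List (Char × Nat) := l.foldr (fun c acc => pvRleStep acc c) []

theorem pvRle_eq_canon (l : List Char) : pvRle l = pvCanon l := by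
  simp [pvRle, pvCanon, List.foldl_reverse]

theorem pvCanon_pos : ∀ (l : List Char), ∀ p ∈ pvCanon l, 1 ≤ p.2 := by
  intro l
  induction l with
  | nil => simp [pvCanon]
  | cons c t ih =>
      intro p hp
      simp only [pvCanon, List.foldr] at hp
      revert hp
      show p ∈ pvRleStep (pvCanon t) c → _
      cases h : pvCanon t with
      | nil =>
          simp only [pvRleStep, List.mem_singleton]
          rintro rfl; simp
      | cons q r =>
          obtain ⟨d, k⟩ := q
          simp only [pvRleStep]
          split_ifs with hcd <;> intro hp
          · rcases List.mem_cons.1 hp with h1 | h1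
            · simp [h1]
            · exact ih p (h ▸ List.mem_cons_of_mem _ h1)
          · rcases List.mem_cons.1 hp with h1 | h1
            · simp [h1]
            · exact ih p (h ▸ h1)

-- splitting one (char,filler) pair off a run of length ≥ 2
theorem pvEmit_bump (c : Char) (k : Nat) (r : List (Char × Nat)) :
    pvEmit false ((c, k + 2) :: r) =
      c :: (if c == 'X' then 'Q' else 'X') :: pvEmit false ((c, k + 1) :: r) := by
  cases r with
  | nil => simp [pvEmit, List.replicate_succ]
  | cons q t => obtain ⟨d, j⟩ := q; simp [pvEmit, List.replicate_succ]

theorem pvLoop_eq : ∀ (l acc : List Char), pvALoop l acc = acc ++ pvEmit false (pvCanon l) := by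
  intro l acc
  fun_induction pvALoop l acc with
  | case1 f s rest result h ih =>
      have hfs : f = s := by simpa using h
      rw [ih]
      have hhead : pvCanon (f :: s :: rest) = pvRleStep (pvCanon (s :: rest)) f := rfl
      have hhead2 : pvCanon (s :: rest) = pvRleStep (pvCanon rest) s := rfl
      subst hfs
      cases hc : pvCanon rest with
      | nil =>
          rw [hhead, hhead2, hc]
          simp [pvRleStep, pvEmit_bump]
      | cons q r =>
          obtain ⟨d, k⟩ := q
          have hk : 1 ≤ k := pvCanon_pos rest (d, k) (hc ▸ List.mem_cons_self ..)
          rw [hhead, hhead2, hc]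
          by_cases hcd : f = d
          · subst hcd
            simp only [pvRleStep, BEq.rfl, if_true]
            obtain ⟨k', rfl⟩ : ∃ k', k = k' + 1 := ⟨k - 1, by omega⟩
            simp [pvEmit_bump]
          · have : (f == d) = false := by simp [hcd]
            simp [pvRleStep, this, pvEmit_bump]
  | case2 f s rest result h ih =>
      have hfs : f ≠ s := by simpa using h
      rw [ih]
      have hhead : pvCanon (f :: s :: rest) = pvRleStep (pvCanon (s :: rest)) f := rfl
      have hhead2 : pvCanon (s :: rest) = pvRleStep (pvCanon rest) s := rfl
      have hfsb : (f == s) = false := by simp [hfs]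
      cases hc : pvCanon rest with
      | nil =>
          rw [hhead, hhead2, hc]
          simp [pvRleStep, hfsb, pvEmit]
      | cons q r =>
          obtain ⟨d, k⟩ := q
          rw [hhead, hhead2, hc]
          by_cases hsd : s = d
          · subst hsd
            simp only [pvRleStep, BEq.rfl, if_true, hfsb]
            simp [pvEmit]
          · have : (s == d) = false := by simp [hsd]
            simp only [pvRleStep, this]
            simp [pvEmit, hfs]
  | case3 rest result h =>
      cases rest with
      | nil => simp [pvCanon, pvEmit]
      | cons x t =>
        cases t with
        | nil => simp [pvCanon, pvRleStep, pvEmit]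
        | cons y u => exact absurd rfl (h x y u)

-- ===== VERDICT (by name: the statement is the Claim_ definition above) =====
theorem split_two_words_spec : Claim_equal_split_two_words := by
  intro message _
  unfold Spec_split_two_words split_two_words split_two_words_alt
  rw [pvRle_eq_canon, pvLoop_eq]
  simp
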